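-- pv_equiv track=rewrite | github.com/Aphrodine-wq/AEON | aeon/adapters/js_adapter.py | _body_has_side_effects
-- ===== SOURCE A (Python) =====
-- _JS_SIDE_EFFECT_FUNCS = {
--     "console.log", "console.error", "console.warn", "console.info",
--     "alert", "prompt", "confirm",
--     "fetch", "XMLHttpRequest",
--     "setTimeout", "setInterval",
--     "document.write", "document.getElementById",
--     "fs.readFileSync", "fs.writeFileSync", "fs.readFile", "fs.writeFile",
--     "require",
-- }
--
-- _JS_SIDE_EFFECT_METHODS = {
--     "log", "error", "warn", "info",
--     "write", "read", "send", "emit",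
--     "push", "pop", "shift", "unshift", "splice",
--     "set", "delete", "clear",
--     "appendChild", "removeChild", "insertBefore",
--     "addEventListener", "removeEventListener",
--     "querySelector", "querySelectorAll",
--     "fetch", "json", "text",
--     "then", "catch",
-- }
--
-- def _body_has_side_effects(body: str) -> bool:
--     """Heuristic: does a function body have side effects?"""
--     for func in _JS_SIDE_EFFECT_FUNCS:
--         if func in body:
--             return True
--     for method in _JS_SIDE_EFFECT_METHODS:
--         if f'.{method}(' in body:
--             return True
--     return False
-- ===== SOURCE B (Python) =====
-- # B: single left-to-right scan; at each '.' it parses the following identifier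
-- # and looks it up in a set, instead of searching for each dot-method pattern.
-- _FUNC_TOKENS = tuple(
--     "console.log console.error console.warn console.info alert prompt".split()
--     + "confirm fetch XMLHttpRequest setTimeout setInterval document.write".split()
--     + "document.getElementById fs.readFileSync fs.writeFileSync fs.readFile fs.writeFile require".split())
--
-- _METHOD_SET = frozenset(
--     "log error warn info write read send".split()
--     + "emit push pop shift unshift splice set".split()
--     + "delete clear appendChild removeChild insertBefore addEventListener removeEventListener".split()
--     + "querySelector querySelectorAll fetch json text then catch".split())
--
-- def _body_has_side_effects(body: str) -> bool:
--     """Heuristic: does a function body have side effects?"""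
--     n = len(body)
--     i = 0
--     while i < n:
--         if any(body.startswith(f, i) for f in _FUNC_TOKENS):
--             return True
--         if body[i] == '.':
--             rest = body[i + 1:]
--             k = 0
--             while k < len(rest) and rest[k].isalpha():
--                 k += 1
--             if k < len(rest) and rest[k] == '(' and rest[:k] in _METHOD_SET:
--                 return True
--         i += 1
--     return False
-- ===== Notes on version B (the rewrite author's own statement) =====
-- stated objective: alternative
-- what changed: Replaces A's 28 per-method dot-call substring searches with a single left-to-right scan that, at each dot, parses the following identifier and looks it up in a set (the 18 function names are still prefix-tested per position during the same single pass).
import Mathlib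
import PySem

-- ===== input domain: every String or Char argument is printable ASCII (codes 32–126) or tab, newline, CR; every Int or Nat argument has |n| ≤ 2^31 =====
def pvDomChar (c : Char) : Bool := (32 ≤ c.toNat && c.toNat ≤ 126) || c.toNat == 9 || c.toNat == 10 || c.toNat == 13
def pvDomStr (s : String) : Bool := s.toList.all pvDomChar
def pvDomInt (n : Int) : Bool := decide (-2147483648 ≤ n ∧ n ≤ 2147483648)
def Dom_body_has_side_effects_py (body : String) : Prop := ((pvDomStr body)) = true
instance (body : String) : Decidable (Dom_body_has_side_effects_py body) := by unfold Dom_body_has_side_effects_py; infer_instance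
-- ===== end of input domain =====

set_option maxRecDepth 8000


-- B replaces A's 28 per-method dot-call substring searches by ONE left-to-right
-- scan that, at each '.', parses the following identifier and looks it up in a
-- set (objective: alternative; A iterates Python sets, whose order is irrelevant
-- to the Boolean result, so the ports fix a concrete order for each table).

-- ===== PORT A =====
def pvJsFuncsA : List (List Char) := ["console.log".toList, "console.error".toList, "console.warn".toList, "console.info".toList, "alert".toList, "prompt".toList, "confirm".toList, "fetch".toList, "XMLHttpRequest".toList, "setTimeout".toList, "setInterval".toList, "document.write".toList, "document.getElementById".toList, "fs.readFileSync".toList, "fs.writeFileSync".toList, "fs.readFile".toList, "fs.writeFile".toList, "require".toList]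

def pvJsMethodsA : List (List Char) := ["log".toList, "error".toList, "warn".toList, "info".toList, "write".toList, "read".toList, "send".toList, "emit".toList, "push".toList, "pop".toList, "shift".toList, "unshift".toList, "splice".toList, "set".toList, "delete".toList, "clear".toList, "appendChild".toList, "removeChild".toList, "insertBefore".toList, "addEventListener".toList, "removeEventListener".toList, "querySelector".toList, "querySelectorAll".toList, "fetch".toList, "json".toList, "text".toList, "then".toList, "catch".toList]

-- 'for func in FUNCS: if func in body: return True' = any-with-early-return;
-- 'f'.{method}('' builds '.' ++ method ++ '('; 'sub in body' is PySem.Chars.isIn.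
def body_has_side_effects_py (body : String) : Bool :=
  if pvJsFuncsA.any (fun func => PySem.Chars.isIn func body.toList) then true
  else if pvJsMethodsA.any (fun method => PySem.Chars.isIn ('.' :: method ++ ['(']) body.toList) then true
  else false

-- ===== PORT B =====
-- str.split() on a single-space-separated word list: exact hand port there
-- (the tables below contain single spaces only, no runs or edge whitespace).
def pvSplitWords (acc : List Char) : List Char → List (List Char)
  | [] => [acc.reverse]
  | c :: rest =>
      if c = ' ' then acc.reverse :: pvSplitWords [] rest
      else pvSplitWords (c :: acc) rest

-- Source B's tables: space-separated literals split into tokens, lists concatenated.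
def pvFuncTokens : List (List Char) :=
  pvSplitWords [] ("console.log console.error console.warn console.info alert prompt".toList)
  ++ pvSplitWords [] ("confirm fetch XMLHttpRequest setTimeout setInterval document.write".toList)
  ++ pvSplitWords [] ("document.getElementById fs.readFileSync fs.writeFileSync fs.readFile fs.writeFile require".toList)

def pvMethodSet : List (List Char) :=
  pvSplitWords [] ("log error warn info write read send".toList)
  ++ pvSplitWords [] ("emit push pop shift unshift splice set".toList)
  ++ pvSplitWords [] ("delete clear appendChild removeChild insertBefore addEventListener removeEventListener".toList)
  ++ pvSplitWords [] ("querySelector querySelectorAll fetch json text then catch".toList)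

-- Source B's inner while loop counts the leading alphabetic run of rest = body[i+1:];
-- rest[:k] is that run (takeWhile), rest[k:] starts at its end (dropWhile), the
-- 'k < len(rest) and rest[k] == '('' test looks at the first char after the run.
-- Python's str.isalpha agrees with Char.isAlpha on the ASCII domain Dom_.
def pvDotHit (rest : List Char) : Bool :=
  match rest.dropWhile Char.isAlpha with
  | '(' :: _ => pvMethodSet.contains (rest.takeWhile Char.isAlpha)
  | _ => false

-- the outer while loop over positions i: each step sees the suffix body[i:].
def pvScanB : List Char → Bool
  | [] => false
  | c :: rest =>
      if pvFuncTokens.any (fun f => f.isPrefixOf (c :: rest)) then true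
      else if c == '.' && pvDotHit rest then true
      else pvScanB rest

def body_has_side_effects_py_alt (body : String) : Bool :=
  pvScanB body.toList

-- ===== PRECONDITION & SPEC =====
def Spec_body_has_side_effects_py (body : String) (out : Bool) : Prop := out = body_has_side_effects_py_alt body
instance (body : String) (out : Bool) : Decidable (Spec_body_has_side_effects_py body out) := by unfold Spec_body_has_side_effects_py; infer_instance

-- ===== CLAIM (what is proved, stated in full; the proofs are below) =====
def Claim_equal_body_has_side_effects_py : Prop := ∀ (body : String), Dom_body_has_side_effects_py body → Spec_body_has_side_effects_py body (body_has_side_effects_py body)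

-- ===== LEMMAS AND PROOFS =====

-- one scan step's hit condition, as a predicate on the current suffix
def pvHitB : List Char → Bool
  | [] => false
  | c :: rest => pvFuncTokens.any (fun f => f.isPrefixOf (c :: rest)) || (c == '.' && pvDotHit rest)

theorem pvScanB_step (c : Char) (rest : List Char) :
    pvScanB (c :: rest) = (pvHitB (c :: rest) || pvScanB rest) := by
  by_cases h1 : pvFuncTokens.any (fun f => f.isPrefixOf (c :: rest)) = true
  · simp [pvScanB, pvHitB, h1]
  · by_cases h2 : (c == '.' && pvDotHit rest) = true
    · simp [pvScanB, pvHitB, h1, h2]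
    · simp [pvScanB, pvHitB, h1, h2]

theorem pvScanB_iff (s : List Char) :
    pvScanB s = true ↔ ∃ u, u <:+ s ∧ pvHitB u = true := by
  induction s with
  | nil =>
      constructor
      · intro h; simp [pvScanB] at h
      · rintro ⟨u, hu, hh⟩
        rw [List.suffix_nil.1 hu] at hh; simp [pvHitB] at hh
  | cons c rest ih =>
      rw [pvScanB_step, Bool.or_eq_true, ih]
      constructor
      · rintro (h | ⟨u, hu, hh⟩)
        · exact ⟨c :: rest, List.suffix_refl _, h⟩
        · exact ⟨u, hu.trans (List.suffix_cons _ _), hh⟩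
      · rintro ⟨u, hu, hh⟩
        rcases List.suffix_cons_iff.1 hu with rfl | hu'
        · exact Or.inl hh
        · exact Or.inr ⟨u, hu', hh⟩

theorem pvFuncTokens_eq : pvFuncTokens = pvJsFuncsA := by
  simp [pvFuncTokens, pvSplitWords, pvJsFuncsA]

theorem pvMethodSet_eq : pvMethodSet = pvJsMethodsA := by
  simp [pvMethodSet, pvSplitWords, pvJsMethodsA]

theorem pvMethodSet_alpha : ∀ m ∈ pvMethodSet, ∀ ch ∈ m, ch.isAlpha = true := by
  have h : (pvJsMethodsA.all (fun m => m.all Char.isAlpha)) = true := by decide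
  rw [pvMethodSet_eq]
  simpa only [List.all_eq_true] using h

theorem pvTakeDrop_split {p : Char → Bool} (m : List Char) (c : Char) (t : List Char)
    (hm : ∀ x ∈ m, p x = true) (hc : p c = false) :
    (m ++ c :: t).takeWhile p = m ∧ (m ++ c :: t).dropWhile p = c :: t := by
  induction m with
  | nil => simp [hc]
  | cons x xs ihm =>
      have hx : p x = true := hm x (List.mem_cons_self ..)
      have := ihm (fun y hy => hm y (List.mem_cons_of_mem _ hy))
      simp [hx, this.1, this.2]

theorem pvDotHit_iff (rest : List Char) :
    pvDotHit rest = true ↔ ∃ m ∈ pvMethodSet, (m ++ ['(']) <+: rest := by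
  constructor
  · intro h
    unfold pvDotHit at h
    split at h
    next t heq =>
      have hmem : rest.takeWhile Char.isAlpha ∈ pvMethodSet := by
        simpa [List.contains_iff_mem] using h
      refine ⟨_, hmem, t, ?_⟩
      have hsplit := List.takeWhile_append_dropWhile (p := Char.isAlpha) (l := rest)
      rw [heq] at hsplit
      simpa using hsplit
    next => exact absurd h (by simp)
  · rintro ⟨m, hm, t, rfl⟩
    obtain ⟨htw, hdw⟩ := pvTakeDrop_split m '(' t
      (pvMethodSet_alpha m hm) (by decide)
    unfold pvDotHit
    rw [show m ++ ['('] ++ t = m ++ '(' :: t by simp, hdw, htw]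
    simpa [List.contains_iff_mem] using hm

theorem pvFuncTokens_nonempty : ∀ f ∈ pvFuncTokens, f ≠ [] := by
  have h : (pvJsFuncsA.all (fun f => !f.isEmpty)) = true := by decide
  rw [pvFuncTokens_eq]
  simpa using h

-- B's scan answers: some func is an infix, or some dot-method-call token is an infix.
theorem pvScanB_char (s : List Char) :
    pvScanB s = true ↔
      (∃ f ∈ pvFuncTokens, f <:+: s) ∨
      (∃ m ∈ pvMethodSet, ('.' :: m ++ ['(']) <:+: s) := by
  rw [pvScanB_iff]
  constructor
  · rintro ⟨u, hu, hh⟩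
    rcases u with _ | ⟨c, rest⟩
    · simp [pvHitB] at hh
    · rcases Bool.or_eq_true .. |>.mp hh with h1 | h2
      · obtain ⟨f, hf, hp⟩ := List.any_eq_true.1 h1
        exact Or.inl ⟨f, hf,
          List.infix_iff_prefix_suffix.2 ⟨_, List.isPrefixOf_iff_prefix.1 hp, hu⟩⟩
      · obtain ⟨hc, hd⟩ := Bool.and_eq_true .. |>.mp h2
        obtain ⟨m, hm, t, rfl⟩ := (pvDotHit_iff rest).1 hd
        refine Or.inr ⟨m, hm, List.infix_iff_prefix_suffix.2 ⟨c :: (m ++ ['(']) ++ t, ?_, hu⟩⟩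
        have : c = '.' := by simpa using hc
        subst this
        exact ⟨t, by simp⟩
  · rintro (⟨f, hf, hi⟩ | ⟨m, hm, hi⟩)
    · obtain ⟨u, hp, hu⟩ := List.infix_iff_prefix_suffix.1 hi
      refine ⟨u, hu, ?_⟩
      rcases u with _ | ⟨c, rest⟩
      · exact absurd (List.prefix_nil.1 hp) (pvFuncTokens_nonempty f hf)
      · exact Bool.or_eq_true .. |>.mpr (Or.inl
          (List.any_eq_true.2 ⟨f, hf, List.isPrefixOf_iff_prefix.2 hp⟩))
    · obtain ⟨u, hp, hu⟩ := List.infix_iff_prefix_suffix.1 hi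
      rcases u with _ | ⟨c, rest⟩
      · exact absurd (List.prefix_nil.1 hp) (by simp)
      · obtain ⟨hc, hp'⟩ := List.cons_prefix_cons.1 hp
        subst hc
        refine ⟨'.' :: rest, hu, ?_⟩
        simp [pvHitB, (pvDotHit_iff rest).2 ⟨m, hm, hp'⟩]

-- A's two loops answer the same question over the same (permuted) tables.
theorem pvA_char (body : String) :
    body_has_side_effects_py body = true ↔
      (∃ f ∈ pvJsFuncsA, f <:+: body.toList) ∨
      (∃ m ∈ pvJsMethodsA, ('.' :: m ++ ['(']) <:+: body.toList) := by
  rw [body_has_side_effects_py]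
  split_ifs with h1 h2
  · simp only [List.any_eq_true, PySem.Chars.isIn_iff_infix] at h1
    simpa using Or.inl h1
  · simp only [List.any_eq_true, PySem.Chars.isIn_iff_infix] at h2
    simpa using Or.inr h2
  · simp only [List.any_eq_true, PySem.Chars.isIn_iff_infix] at h1 h2
    simp only [false_iff]
    rintro (⟨f, hf, hi⟩ | ⟨m, hm, hi⟩)
    exacts [h1 ⟨f, hf, hi⟩, h2 ⟨m, hm, hi⟩]

theorem bhse_agree (body : String) :
    body_has_side_effects_py body = body_has_side_effects_py_alt body := by
  have hiff : body_has_side_effects_py body = true ↔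
      body_has_side_effects_py_alt body = true := by
    rw [pvA_char, body_has_side_effects_py_alt, pvScanB_char,
      pvFuncTokens_eq, pvMethodSet_eq]
  cases hb : body_has_side_effects_py_alt body
  · rw [← Bool.not_eq_true] at hb ⊢
    intro h; exact hb (hiff.1 h)
  · exact hiff.2 hb

-- ===== VERDICT (by name: the statement is the Claim_ definition above) =====
theorem body_has_side_effects_py_spec : Claim_equal_body_has_side_effects_py :=
  fun body _ => bhse_agree body
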